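-- pv_equiv track=rewrite | github.com/UL-FRI-NLP-Course/ul-fri-nlp-course-project-2024-2025-chatbot-champions | src/scraper/rtvslo_crawler.py | replace_slovenian_months
-- ===== SOURCE A (Python) =====
-- def replace_slovenian_months(date_str):
--     months = {
--         "januar": "January",
--         "februar": "February",
--         "marec": "March",
--         "april": "April",
--         "maj": "May",
--         "junij": "June",
--         "julij": "July",
--         "avgust": "August",
--         "september": "September",
--         "oktober": "October",
--         "november": "November",
--         "december": "December",
--     }
--     for slovenian, english in months.items():
--         date_str = date_str.replace(slovenian, english)
--     return date_str
-- ===== SOURCE B (Python) =====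
-- def replace_slovenian_months(date_str):
--     # month names as (slovenian, english) pairs, in the same priority order
--     table = [
--         ("januar", "January"), ("februar", "February"),
--         ("marec", "March"), ("april", "April"),
--         ("maj", "May"), ("junij", "June"), ("julij", "July"),
--         ("avgust", "August"), ("september", "September"),
--         ("oktober", "October"), ("november", "November"),
--         ("december", "December"),
--     ]
--     out = []
--     i = 0
--     n = len(date_str)
--     while i < n:
--         for slo, eng in table:
--             if date_str.startswith(slo, i):
--                 out.append(eng)
--                 i += len(slo)
--                 break
--         else:
--             out.append(date_str[i])
--             i += 1
--     return "".join(out)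
-- ===== Notes on version B (the rewrite author's own statement) =====
-- stated objective: alternative
-- what changed: Replaces the 12 sequential full-string .replace() passes with one left-to-right scan that, at each position, substitutes the first month name matching there (dict as lookup table), building the output in a single pass. Pre_ excludes strings containing one of the four overlap patterns 'majanuar', 'junijanuar', 'julijanuar', 'julijunij', where two month names overlap and A's dict-order replacement and B's leftmost-first replacement are both defensible resolutions of the tie.
-- outside the precondition, e.g. on replace_slovenian_months('majanuar'): A returns 'maJanuary', B returns 'Mayanuar'; on replace_slovenian_months('junijanuar'): A returns 'juniJanuary', B returns 'Juneanuar'; on replace_slovenian_months('julijanuar'): A returns 'juliJanuary', B returns 'Julyanuar'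
import Mathlib
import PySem

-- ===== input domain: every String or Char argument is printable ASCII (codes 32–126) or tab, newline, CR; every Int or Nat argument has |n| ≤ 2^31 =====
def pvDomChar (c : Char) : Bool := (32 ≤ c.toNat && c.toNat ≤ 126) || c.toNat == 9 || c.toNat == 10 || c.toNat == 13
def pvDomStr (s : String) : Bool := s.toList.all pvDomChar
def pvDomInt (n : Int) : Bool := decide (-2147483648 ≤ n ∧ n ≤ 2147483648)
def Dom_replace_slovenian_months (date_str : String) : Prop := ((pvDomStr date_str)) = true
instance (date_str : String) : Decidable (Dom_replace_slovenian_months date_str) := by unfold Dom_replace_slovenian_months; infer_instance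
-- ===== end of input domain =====

-- B replaces A's 12 sequential full-string replace passes by one left-to-right scan that substitutes
-- the first month name matching at each position (alternative decomposition, same cost class).


-- ===== PORT A =====
-- the dict literal of A (distinct keys, insertion order = association list)
def monthsList : List (String × String) :=
  [("januar", "January"), ("februar", "February"), ("marec", "March"),
   ("april", "April"), ("maj", "May"), ("junij", "June"), ("julij", "July"),
   ("avgust", "August"), ("september", "September"), ("oktober", "October"),
   ("november", "November"), ("december", "December")]

-- A: for each (slovenian, english) in months.items(): date_str = date_str.replace(slovenian, english)
def replace_slovenian_months (date_str : String) : String :=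
  monthsList.foldl (fun s p => PySem.Str.replace s p.1 p.2) date_str

-- ===== PORT B =====
-- B works character by character, so its month table holds the names as char lists
def monthsC : List (List Char × List Char) :=
  [(['j', 'a', 'n', 'u', 'a', 'r'],
    ['J', 'a', 'n', 'u', 'a', 'r', 'y']),
   (['f', 'e', 'b', 'r', 'u', 'a', 'r'],
    ['F', 'e', 'b', 'r', 'u', 'a', 'r', 'y']),
   (['m', 'a', 'r', 'e', 'c'],
    ['M', 'a', 'r', 'c', 'h']),
   (['a', 'p', 'r', 'i', 'l'],
    ['A', 'p', 'r', 'i', 'l']),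
   (['m', 'a', 'j'],
    ['M', 'a', 'y']),
   (['j', 'u', 'n', 'i', 'j'],
    ['J', 'u', 'n', 'e']),
   (['j', 'u', 'l', 'i', 'j'],
    ['J', 'u', 'l', 'y']),
   (['a', 'v', 'g', 'u', 's', 't'],
    ['A', 'u', 'g', 'u', 's', 't']),
   (['s', 'e', 'p', 't', 'e', 'm', 'b', 'e', 'r'],
    ['S', 'e', 'p', 't', 'e', 'm', 'b', 'e', 'r']),
   (['o', 'k', 't', 'o', 'b', 'e', 'r'],
    ['O', 'c', 't', 'o', 'b', 'e', 'r']),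
   (['n', 'o', 'v', 'e', 'm', 'b', 'e', 'r'],
    ['N', 'o', 'v', 'e', 'm', 'b', 'e', 'r']),
   (['d', 'e', 'c', 'e', 'm', 'b', 'e', 'r'],
    ['D', 'e', 'c', 'e', 'm', 'b', 'e', 'r'])]

-- B's while-loop over positions: at each position the inner for-loop finds the first month name
-- starting there (str.startswith(slo, i)); on a hit it appends the English name and jumps len(slo)
-- ahead, else it copies the character. Ported as recursion on the remaining suffix.
def bscan : List Char → List Char
  | [] => []
  | c :: t =>
    match monthsC.find? (fun p => p.1.isPrefixOf (c :: t)) with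
    | some p => p.2 ++ bscan (t.drop (p.1.length - 1))
    | none => c :: bscan t
termination_by s => s.length
decreasing_by
  · simp
  · simp

def replace_slovenian_months_alt (date_str : String) : String :=
  String.ofList (bscan date_str.toList)

-- ===== PRECONDITION & SPEC =====
-- the four substrings in which two month names overlap and A's dict-order choice
-- disagrees with B's leftmost-first choice
def badsC : List (List Char) :=
  ["majanuar", "junijanuar", "julijanuar", "julijunij"].map String.toList

-- Pre_ excludes strings containing one of the four overlap patterns "majanuar", "junijanuar",
-- "julijanuar", "julijunij": there two month names overlap, and which one is replaced is a tie
-- A resolves by dict order and B by leftmost match — both defensible, no one would specify either.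
def Pre_replace_slovenian_months (date_str : String) : Prop :=
  ∀ b ∈ badsC, ¬ b <:+: date_str.toList
instance (date_str : String) : Decidable (Pre_replace_slovenian_months date_str) := by
  unfold Pre_replace_slovenian_months; infer_instance

def pvWitness_replace_slovenian_months : String := "Objavljeno 12. januar 2024, posodobljeno maja"

def Spec_replace_slovenian_months (date_str : String) (out : String) : Prop := out = replace_slovenian_months_alt date_str
instance (date_str : String) (out : String) : Decidable (Spec_replace_slovenian_months date_str out) := by unfold Spec_replace_slovenian_months; infer_instance

-- ===== CLAIM (what is proved, stated in full; the proofs are below) =====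
def Claim_equal_replace_slovenian_months : Prop := ∀ (date_str : String), Dom_replace_slovenian_months date_str → Pre_replace_slovenian_months date_str → Spec_replace_slovenian_months date_str (replace_slovenian_months date_str)

-- ===== LEMMAS AND PROOFS =====

-- B's char table is exactly A's string table pushed through toList (finite check)
theorem monthsC_eq : monthsList.map (fun p => (p.1.toList, p.2.toList)) = monthsC := by decide

-- clean recursive form of CPython's str.replace (leftmost, non-overlapping), for nonempty `old`
def rep (k v : List Char) : List Char → List Char
  | [] => []
  | c :: t => if k.isPrefixOf (c :: t) then v ++ rep k v (t.drop (k.length - 1)) else c :: rep k v t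
termination_by s => s.length
decreasing_by
  · simp
  · simp

theorem prefix_append_cases {α : Type} (k x y : List α) (h : k <+: x ++ y) :
    k <+: x ∨ (x <+: k ∧ k.drop x.length <+: y) := by
  by_cases hle : k.length ≤ x.length
  · exact Or.inl ((List.isPrefix_append_of_length hle).mp h)
  · have hx : x <+: k :=
      List.prefix_of_prefix_length_le (List.prefix_append x y) h (le_of_not_ge hle)
    refine Or.inr ⟨hx, ?_⟩
    have hk : x ++ k.drop x.length = k := by
      obtain ⟨d, hd⟩ := hx
      simp [← hd]
    apply (List.prefix_append_right_inj x).mp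
    rw [hk]; exact h

theorem rep_cons_neg (k v : List Char) (c : Char) (t : List Char) (h : ¬ k <+: c :: t) :
    rep k v (c :: t) = c :: rep k v t := by
  rw [rep]
  simp [List.isPrefixOf_iff_prefix, h]

theorem rep_prefix (k v r : List Char) (hk : k ≠ []) : rep k v (k ++ r) = v ++ rep k v r := by
  obtain ⟨c, k', rfl⟩ := List.exists_cons_of_ne_nil hk
  rw [List.cons_append, rep]
  have : (c :: k').isPrefixOf (c :: (k' ++ r)) = true := by
    simp [List.isPrefixOf_iff_prefix, List.prefix_append]
  simp only [this, if_pos]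
  congr 1
  congr 1
  simp

theorem go_eq_rep (k v : List Char) (hk : k ≠ []) :
    ∀ (fuel : Nat) (l acc : List Char), l.length ≤ fuel →
      PySem.Chars.replace.go k v fuel l acc = acc.reverse ++ rep k v l := by
  intro fuel
  induction fuel with
  | zero =>
    intro l acc hl
    have : l = [] := List.eq_nil_of_length_eq_zero (Nat.le_zero.mp hl)
    subst this
    rw [PySem.Chars.replace.go, rep]
  | succ n ih =>
    intro l acc hl
    match l with
    | [] =>
      rw [PySem.Chars.replace.go, rep]
      simp
      omega
    | c :: t =>
      rw [PySem.Chars.replace.go, rep]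
      by_cases hp : k.isPrefixOf (c :: t)
      · simp only [hp, if_pos]
        have hdrop : List.drop k.length (c :: t) = t.drop (k.length - 1) := by
          obtain ⟨a, k', rfl⟩ := List.exists_cons_of_ne_nil hk
          simp
        rw [hdrop, ih _ _ (by simp at hl ⊢; omega)]
        simp
      · simp only [hp, if_neg, Bool.false_eq_true, not_false_eq_true]
        rw [ih _ _ (by simp at hl ⊢; omega)]
        simp

theorem replace_eq_rep (k v s : List Char) (hk : k ≠ []) :
    PySem.Chars.replace s k v = rep k v s := by
  rw [PySem.Chars.replace]
  have : k.isEmpty = false := by simp [hk]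
  rw [this]
  simpa using go_eq_rep k v hk s.length s [] (le_refl _)

-- a word none of whose characters is the head of `v` stays a prefix through one replace pass
theorem rep_prefix_inv (k v : List Char) (hv : v ≠ []) :
    ∀ (u w : List Char), (∀ c ∈ w, some c ≠ v.head?) → w <+: rep k v u → w <+: u := by
  intro u
  induction u with
  | nil => intro w _ h; rw [rep] at h; exact h
  | cons c t ih =>
    intro w hw h
    match w with
    | [] => exact List.nil_prefix
    | d :: w' =>
      rw [rep] at h
      by_cases hp : k.isPrefixOf (c :: t)
      · exfalso
        simp only [hp, if_pos] at h
        obtain ⟨vh, vt, rfl⟩ := List.exists_cons_of_ne_nil hv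
        rw [List.cons_append] at h
        have : d = vh := (List.cons_prefix_cons.mp h).1
        exact hw d (by simp) (by simp [this])
      · simp only [hp, Bool.false_eq_true, if_neg, not_false_eq_true] at h
        obtain ⟨rfl, hw'⟩ := List.cons_prefix_cons.mp h
        have := ih w' (fun c hc => hw c (by simp [hc])) hw'
        exact List.cons_prefix_cons.mpr ⟨rfl, this⟩

-- replace skips over a block `x` in which (and across whose suffixes) the key never matches
theorem rep_append (k v : List Char) :
    ∀ (x y : List Char), (∀ i, i < x.length → ¬ k <+: (x.drop i ++ y)) →
      rep k v (x ++ y) = x ++ rep k v y := by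
  intro x
  induction x with
  | nil => intro y _; simp
  | cons c x' ih =>
    intro y h
    have h0 : ¬ k <+: (c :: x') ++ y := by simpa using h 0 (by simp)
    rw [List.cons_append, rep_cons_neg k v c (x' ++ y) (by simpa using h0)]
    rw [ih y (fun i hi => by simpa using h (i + 1) (by simp; omega))]
    simp

theorem foldl_rep_nil (M : List (List Char × List Char)) :
    M.foldl (fun a p => rep p.1 p.2 a) [] = [] := by
  induction M with
  | nil => rfl
  | cons q M' ih => simp only [List.foldl_cons]; rw [rep]; exact ih

-- when no key matches at the head, the whole fold commutes with cons
theorem foldl_rep_cons (c : Char) (M : List (List Char × List Char))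
    (hM : ∀ p ∈ M, p.1 ≠ [] ∧ p.2 ≠ [])
    (hcross : ∀ p ∈ M, ∀ q ∈ M, ∀ ch ∈ p.1, some ch ≠ q.2.head?) :
    ∀ (t : List Char), (∀ p ∈ M, ¬ p.1 <+: c :: t) →
      M.foldl (fun a p => rep p.1 p.2 a) (c :: t) = c :: M.foldl (fun a p => rep p.1 p.2 a) t := by
  induction M with
  | nil => intro t _; simp
  | cons q M' ih =>
    intro t h
    simp only [List.foldl_cons]
    rw [rep_cons_neg q.1 q.2 c t (h q (by simp))]
    apply ih (fun p hp => hM p (by simp [hp]))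
      (fun p hp r hr => hcross p (by simp [hp]) r (by simp [hr]))
    intro p hp hpre
    obtain ⟨ch, w, hpw⟩ := List.exists_cons_of_ne_nil (hM p (by simp [hp])).1
    rw [hpw] at hpre
    obtain ⟨rfl, hw⟩ := List.cons_prefix_cons.mp hpre
    have : w <+: t :=
      rep_prefix_inv q.1 q.2 (hM q (by simp)).2 t w
        (fun d hd => hcross p (by simp [hp]) q (by simp) d (by simp [hpw, hd])) hw
    exact h p (by simp [hp]) (by rw [hpw]; exact List.cons_prefix_cons.mpr ⟨rfl, this⟩)

-- stage 1: earlier replace passes leave the matched key `kj` at the front intact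
theorem foldl_rep_preserve (kj : List Char) (M : List (List Char × List Char))
    (hM : ∀ p ∈ M, p.1 ≠ [] ∧ p.2 ≠ [])
    (hH : ∀ q ∈ M, ∀ i, i < kj.length →
      ¬ q.1 <+: kj.drop i ∧ (kj.drop i <+: q.1 → kj ++ q.1.drop (kj.length - i) ∈ badsC))
    (hbk : ∀ b ∈ badsC, ¬ b <+: kj)
    (hbv : ∀ q ∈ M, ∀ b ∈ badsC, ∀ c ∈ b, some c ≠ q.2.head?) :
    ∀ (y : List Char), (∀ b ∈ badsC, ¬ b <+: kj ++ y) →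
      M.foldl (fun a p => rep p.1 p.2 a) (kj ++ y) =
        kj ++ M.foldl (fun a p => rep p.1 p.2 a) y := by
  induction M with
  | nil => intro y _; simp
  | cons q M' ih =>
    intro y hgood
    simp only [List.foldl_cons]
    have hstep : rep q.1 q.2 (kj ++ y) = kj ++ rep q.1 q.2 y := by
      apply rep_append
      intro i hi hk
      rcases prefix_append_cases q.1 (kj.drop i) y hk with hL | ⟨hR, hdrop⟩
      · exact (hH q (by simp) i hi).1 hL
      · have hbad : kj ++ q.1.drop (kj.length - i) ∈ badsC := (hH q (by simp) i hi).2 hR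
        rw [List.length_drop] at hdrop
        exact hgood _ hbad ((List.prefix_append_right_inj kj).mpr hdrop)
    rw [hstep]
    apply ih (fun p hp => hM p (by simp [hp]))
      (fun p hp => hH p (by simp [hp]))
      (fun p hp => hbv p (by simp [hp]))
    intro b hb hpre
    rcases prefix_append_cases b kj (rep q.1 q.2 y) hpre with hL | ⟨hR, hdrop⟩
    · exact hbk b hb hL
    · have : b.drop kj.length <+: y :=
        rep_prefix_inv q.1 q.2 (hM q (by simp)).2 y _
          (fun c hc => hbv q (by simp) b hb c (List.mem_of_mem_drop hc)) hdrop
      apply hgood b hb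
      have hb' : kj ++ b.drop kj.length = b := by
        obtain ⟨d, hd⟩ := hR
        simp [← hd]
      rw [← hb']
      exact (List.prefix_append_right_inj kj).mpr this
-- stage 3: no key matches inside or across a just-inserted English value `vj`
theorem foldl_rep_value (vj : List Char) (M : List (List Char × List Char))
    (hsafe : ∀ q ∈ M, ∀ i, i < vj.length → ¬ q.1 <+: vj.drop i ∧ ¬ vj.drop i <+: q.1) :
    ∀ (w : List Char),
      M.foldl (fun a p => rep p.1 p.2 a) (vj ++ w) =
        vj ++ M.foldl (fun a p => rep p.1 p.2 a) w := by
  induction M with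
  | nil => intro w; simp
  | cons q M' ih =>
    intro w
    simp only [List.foldl_cons]
    have hstep : rep q.1 q.2 (vj ++ w) = vj ++ rep q.1 q.2 w := by
      apply rep_append
      intro i hi hk
      rcases prefix_append_cases q.1 (vj.drop i) w hk with hL | ⟨hR, _⟩
      · exact (hsafe q (by simp) i hi).1 hL
      · exact (hsafe q (by simp) i hi).2 hR
    rw [hstep, ih (fun p hp => hsafe p (by simp [hp]))]

-- ===== finite facts about the literal tables (evaluated by the kernel via rfl) =====

theorem monthsC_wf : ∀ p ∈ monthsC, p.1 ≠ [] ∧ p.2 ≠ [] := by decide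

-- no month-name character equals the head of any English value (values start uppercase)
theorem monthsC_cross : ∀ p ∈ monthsC, ∀ q ∈ monthsC, ∀ ch ∈ p.1, some ch ≠ q.2.head? := by
  have h : (monthsC.all fun p => monthsC.all fun q => p.1.all fun ch => !(some ch == q.2.head?)) = true := by rfl
  simp only [List.all_eq_true, Bool.not_eq_eq_eq_not, Bool.not_true, beq_eq_false_iff_ne] at h
  exact h

-- no key matches inside or starting inside any English value
theorem monthsC_value_safe :
    ∀ p ∈ monthsC, ∀ q ∈ monthsC, ∀ i, i < p.2.length →
      ¬ q.1 <+: p.2.drop i ∧ ¬ p.2.drop i <+: q.1 := by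
  have h : (monthsC.all fun p => monthsC.all fun q => (List.range p.2.length).all fun i =>
      !(q.1.isPrefixOf (p.2.drop i)) && !((p.2.drop i).isPrefixOf q.1)) = true := by rfl
  simp only [List.all_eq_true, List.mem_range, Bool.and_eq_true, Bool.not_eq_eq_eq_not,
    Bool.not_true, ← Bool.not_eq_true, List.isPrefixOf_iff_prefix] at h
  intro p hp q hq i hi
  exact h p hp q hq i hi

theorem bads_not_prefix_key : ∀ b ∈ badsC, ∀ p ∈ monthsC, ¬ b <+: p.1 := by
  have h : (badsC.all fun b => monthsC.all fun p => !(b.isPrefixOf p.1)) = true := by rfl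
  simp only [List.all_eq_true, Bool.not_eq_true'] at h
  intro b hb p hp
  rw [← List.isPrefixOf_iff_prefix, h b hb p hp]
  simp

theorem bads_cross : ∀ b ∈ badsC, ∀ p ∈ monthsC, ∀ c ∈ b, some c ≠ p.2.head? := by
  have h : (badsC.all fun b => monthsC.all fun p => b.all fun c => !(some c == p.2.head?)) = true := by rfl
  simp only [List.all_eq_true, Bool.not_eq_eq_eq_not, Bool.not_true, beq_eq_false_iff_ne] at h
  exact h

-- an earlier key can overlap a later matched key only in one of the four recorded bad patterns
theorem monthsC_overlap :
    ∀ j, (hj : j < monthsC.length) → ∀ i2, (h2 : i2 < j) → ∀ i, i < (monthsC[j]'hj).1.length →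
      ¬ (monthsC[i2]'(Nat.lt_trans h2 hj)).1 <+: (monthsC[j]'hj).1.drop i ∧
        ((monthsC[j]'hj).1.drop i <+: (monthsC[i2]'(Nat.lt_trans h2 hj)).1 →
          (monthsC[j]'hj).1 ++ (monthsC[i2]'(Nat.lt_trans h2 hj)).1.drop ((monthsC[j]'hj).1.length - i) ∈ badsC) := by
  have h : ((List.range monthsC.length).all fun j => (List.range j).all fun i2 =>
      (List.range (monthsC.getD j ([],[])).1.length).all fun i =>
        !((monthsC.getD i2 ([],[])).1.isPrefixOf ((monthsC.getD j ([],[])).1.drop i)) &&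
        (!(((monthsC.getD j ([],[])).1.drop i).isPrefixOf (monthsC.getD i2 ([],[])).1) ||
          badsC.contains ((monthsC.getD j ([],[])).1 ++ (monthsC.getD i2 ([],[])).1.drop ((monthsC.getD j ([],[])).1.length - i)))) = true := by rfl
  intro j hj i2 h2 i hi
  have hgj : monthsC.getD j ([],[]) = monthsC[j]'hj := List.getD_eq_getElem _ _ hj
  have hgi : monthsC.getD i2 ([],[]) = monthsC[i2]'(Nat.lt_trans h2 hj) := List.getD_eq_getElem _ _ _
  simp only [List.all_eq_true, List.mem_range] at h
  have := h j hj i2 h2 i (by rw [hgj]; exact hi)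
  rw [hgj, hgi] at this
  simp only [Bool.and_eq_true, Bool.or_eq_true, Bool.not_eq_true', List.contains_iff_mem] at this
  refine ⟨fun hc => by simp [List.isPrefixOf_iff_prefix.mpr hc] at this, fun hc => ?_⟩
  rcases this.2 with hF | hm
  · exact absurd (List.isPrefixOf_iff_prefix.mpr hc) (by simp [hF])
  · exact hm

-- ===== main equivalence on char lists =====

def PreC (s : List Char) : Prop := ∀ b ∈ badsC, ¬ b <:+: s

theorem preC_of_infix {s t : List Char} (h : t <:+: s) (hp : PreC s) : PreC t :=
  fun b hb hbt => hp b hb (hbt.trans h)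

theorem mainC : ∀ (n : Nat) (s : List Char), s.length ≤ n → PreC s →
    monthsC.foldl (fun a p => rep p.1 p.2 a) s = bscan s := by
  intro n
  induction n with
  | zero =>
    intro s hs _
    have : s = [] := List.eq_nil_of_length_eq_zero (Nat.le_zero.mp hs)
    subst this
    rw [foldl_rep_nil, bscan]
  | succ n ih =>
    intro s hs hpre
    match s with
    | [] => rw [foldl_rep_nil, bscan]
    | c :: t =>
      rw [bscan]
      cases hf : monthsC.find? (fun p => p.1.isPrefixOf (c :: t)) with
      | none =>
        have hnone := List.find?_eq_none.mp hf
        rw [foldl_rep_cons c monthsC monthsC_wf monthsC_cross t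
          (fun p hp => by simpa [List.isPrefixOf_iff_prefix] using hnone p hp)]
        rw [ih t (by simpa using Nat.lt_succ_iff.mp (by simpa using hs))
          (preC_of_infix ((List.suffix_cons c t).isInfix) hpre)]
      | some pj =>
        obtain ⟨kj, vj⟩ := pj
        obtain ⟨hpj, l₁, l₂, hsplit, hfirst⟩ := List.find?_eq_some_iff_append.mp hf
        have hmemj : (kj, vj) ∈ monthsC := by rw [hsplit]; simp
        have hpre0 : kj <+: c :: t := List.isPrefixOf_iff_prefix.mp hpj
        have hkj_ne : kj ≠ [] := (monthsC_wf (kj, vj) hmemj).1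
        obtain ⟨ch, k', rfl⟩ := List.exists_cons_of_ne_nil hkj_ne
        obtain ⟨rfl, hky⟩ := List.cons_prefix_cons.mp hpre0
        obtain ⟨y, hy⟩ := hky
        have ht : t = k' ++ y := hy.symm
        -- membership facts
        have hmem : ∀ p ∈ l₁, p ∈ monthsC := by
          intro p hp; rw [hsplit]; simp [hp]
        have hmem2 : ∀ p ∈ l₂, p ∈ monthsC := by
          intro p hp; rw [hsplit]; simp [hp]
        -- the overlap facts for the earlier keys l₁ against kj = ch :: k'
        have hH : ∀ q ∈ l₁, ∀ i, i < (ch :: k').length →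
            ¬ q.1 <+: (ch :: k').drop i ∧
              ((ch :: k').drop i <+: q.1 → (ch :: k') ++ q.1.drop ((ch :: k').length - i) ∈ badsC) := by
          intro q hq
          obtain ⟨i2, h2, hq2⟩ := List.getElem_of_mem hq
          have hjlt : l₁.length < monthsC.length := by rw [hsplit]; simp
          have hg1 : monthsC[i2]'(Nat.lt_trans h2 hjlt) = q := by
            rw [List.getElem_of_eq hsplit, List.getElem_append_left h2]
            exact hq2
          have hg2 : monthsC[l₁.length]'hjlt = (ch :: k', vj) := by
            rw [List.getElem_of_eq hsplit]; simp
          have := monthsC_overlap l₁.length hjlt i2 h2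
          rw [hg1, hg2] at this
          exact this
        -- split the fold over the month list
        have hsplitF : ∀ (u : List Char),
            monthsC.foldl (fun a p => rep p.1 p.2 a) u =
              l₂.foldl (fun a p => rep p.1 p.2 a)
                (rep (ch :: k') vj (l₁.foldl (fun a p => rep p.1 p.2 a) u)) := by
          intro u
          rw [hsplit]
          simp [List.foldl_append]
        have hcty : ch :: t = (ch :: k') ++ y := by simp [ht]
        have hgood : ∀ b ∈ badsC, ¬ b <+: (ch :: k') ++ y := by
          intro b hb hbp
          exact hpre b hb (hcty ▸ hbp.isInfix)
        -- stage 1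
        have hst1 : l₁.foldl (fun a p => rep p.1 p.2 a) ((ch :: k') ++ y) =
            (ch :: k') ++ l₁.foldl (fun a p => rep p.1 p.2 a) y :=
          foldl_rep_preserve (ch :: k') l₁ (fun p hp => monthsC_wf p (hmem p hp)) hH
            (fun b hb => bads_not_prefix_key b hb _ hmemj)
            (fun q hq b hb => bads_cross b hb q (hmem q hq)) y hgood
        -- stage 2
        have hst2 : rep (ch :: k') vj ((ch :: k') ++ l₁.foldl (fun a p => rep p.1 p.2 a) y) =
            vj ++ rep (ch :: k') vj (l₁.foldl (fun a p => rep p.1 p.2 a) y) :=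
          rep_prefix (ch :: k') vj _ hkj_ne
        -- stage 3
        have hst3 := foldl_rep_value vj l₂
          (fun q hq i hi => monthsC_value_safe (ch :: k', vj) hmemj q (hmem2 q hq) i hi)
          (rep (ch :: k') vj (l₁.foldl (fun a p => rep p.1 p.2 a) y))
        -- assemble
        rw [hcty, hsplitF ((ch :: k') ++ y), hst1, hst2, hst3, ← hsplitF y]
        -- recurse on y
        have hylen : y.length ≤ n := by
          have h1 : (ch :: t).length ≤ n + 1 := hs
          rw [hcty] at h1
          simp at h1
          omega
        have hysuf : y <:+: ch :: t := by
          rw [hcty]; exact (List.suffix_append (ch :: k') y).isInfix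
        rw [ih y hylen (preC_of_infix hysuf hpre)]
        -- match bscan's step
        have hdropt : t.drop ((ch :: k').length - 1) = y := by
          rw [ht]; simp
        show vj ++ bscan y = vj ++ bscan (t.drop ((ch :: k').length - 1))
        rw [hdropt]

-- bridge: port A's string fold equals the char-list fold of rep
theorem foldl_toList (M : List (String × String)) :
    ∀ (s : String),
      (M.foldl (fun d p => PySem.Str.replace d p.1 p.2) s).toList =
        (M.map (fun p => (p.1.toList, p.2.toList))).foldl
          (fun a p => PySem.Chars.replace a p.1 p.2) s.toList := by
  induction M with
  | nil => intro s; simp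
  | cons q M' ih =>
    intro s
    simp only [List.foldl_cons, List.map_cons]
    rw [ih (PySem.Str.replace s q.1 q.2), PySem.Str.toList_replace]

theorem foldl_replace_eq_rep :
    ∀ (M : List (List Char × List Char)), (∀ p ∈ M, p.1 ≠ []) → ∀ (s : List Char),
      M.foldl (fun a p => PySem.Chars.replace a p.1 p.2) s =
        M.foldl (fun a p => rep p.1 p.2 a) s := by
  intro M
  induction M with
  | nil => intro _ s; rfl
  | cons q M' ih =>
    intro h s
    simp only [List.foldl_cons]
    rw [replace_eq_rep q.1 q.2 s (h q (by simp))]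
    exact ih (fun p hp => h p (by simp [hp])) _

-- ===== VERDICT (by name: the statement is the Claim_ definition above) =====
theorem replace_slovenian_months_spec : Claim_equal_replace_slovenian_months := by
  intro s _ hpre
  unfold Spec_replace_slovenian_months replace_slovenian_months_alt
  apply String.toList_inj.mp
  rw [String.toList_ofList]
  unfold replace_slovenian_months
  rw [foldl_toList monthsList s, monthsC_eq]
  rw [foldl_replace_eq_rep monthsC (fun p hp => (monthsC_wf p hp).1) s.toList]
  exact mainC s.toList.length s.toList (le_refl _) (fun b hb => hpre b hb)
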